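-- pv_equiv track=rewrite | github.com/Codewithharsh09/kbai-project | src/integrations/estrazione_bilancio.py | normalize_label_tokens
-- ===== SOURCE A (Python) =====
-- from typing import Any, Dict, List
--
-- def normalize_label_tokens(tokens: List[str]) -> List[str]:
--     """Riduce ripetizioni e preferisce le parti significative dei token."""
--     if not tokens:
--         return tokens
--
--     normalized = tokens[:]
--     while len(normalized) > 1 and normalized[0].lower() == normalized[1].lower():
--         normalized.pop(0)
--
--     if "Totale" in normalized:
--         idx = normalized.index("Totale")
--         tail = normalized[idx + 1:]
--         if tail:
--             normalized = ["Totale", *tail]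
--
--     return normalized
-- ===== SOURCE B (Python) =====
-- def _after_totale(xs):
--     """Suffix of xs from its first "Totale" (empty if absent), found by an index scan."""
--     i = 0
--     while i < len(xs) and xs[i] != "Totale":
--         i += 1
--     return xs[i:]
--
--
-- def normalize_label_tokens(tokens):
--     """Riduce ripetizioni e preferisce le parti significative dei token."""
--     if not tokens:
--         return tokens
--     lows = [t.lower() for t in tokens]
--     keep = next((i for i, (a, b) in enumerate(zip(lows, lows[1:])) if a != b),
--                 len(tokens) - 1)
--     normalized = tokens[keep:]
--     after = _after_totale(normalized)
--     if len(after) > 1: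
--         return ["Totale", *after[1:]]
--     return normalized
-- ===== Notes on version B (the rewrite author's own statement) =====
-- stated objective: alternative
-- what changed: Replaces the repeated pop(0) on a mutated copy by precomputing the lowercased list once and picking the first index where adjacent lowercased tokens differ (a zip/enumerate search with a default) followed by a single slice, and replaces the membership-test-then-index double scan over the list by one index scan to the first 'Totale'.
import Mathlib
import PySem

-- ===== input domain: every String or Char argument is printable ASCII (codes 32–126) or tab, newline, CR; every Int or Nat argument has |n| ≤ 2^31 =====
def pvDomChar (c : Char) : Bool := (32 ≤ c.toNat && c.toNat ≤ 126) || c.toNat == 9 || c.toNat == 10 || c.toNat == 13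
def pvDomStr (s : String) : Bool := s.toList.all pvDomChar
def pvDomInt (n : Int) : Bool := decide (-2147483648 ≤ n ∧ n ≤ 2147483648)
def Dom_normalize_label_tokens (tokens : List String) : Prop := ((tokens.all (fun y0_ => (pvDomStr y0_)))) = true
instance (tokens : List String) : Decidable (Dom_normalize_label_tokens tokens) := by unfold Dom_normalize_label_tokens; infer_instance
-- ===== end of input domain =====

-- B precomputes the lowercased list once and finds the cut point with a zip/enumerate search
-- instead of A's repeated pop(0), and takes the suffix from the first "Totale" with a dropWhile-style
-- index scan instead of A's membership-test + index + slice (objective: alternative).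

-- ===== PORT A =====
-- A's `while len(normalized) > 1 and normalized[0].lower() == normalized[1].lower(): normalized.pop(0)`
def pvPopLoop : List String → List String
  | a :: b :: rest =>
      if PySem.Str.lower a = PySem.Str.lower b then pvPopLoop (b :: rest) else a :: b :: rest
  | xs => xs

def normalize_label_tokens (tokens : List String) : List String :=
  if tokens = [] then tokens
  else
    let normalized := pvPopLoop tokens
    if "Totale" ∈ normalized then
      match PySem.List.index? normalized "Totale" with
      | none => normalized   -- unreachable: Python's .index cannot raise under the membership guard
      | some idx =>
        let tail := PySem.List.slice normalized (some ((idx : Int) + 1)) none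
        if tail ≠ [] then "Totale" :: tail else normalized
    else normalized

-- ===== PORT B =====
-- B's helper `_after_totale`: `i = 0; while i < len(xs) and xs[i] != "Totale": i += 1; return xs[i:]`
def pvTotaleScan : List String → Nat
  | [] => 0
  | x :: rest => if x ≠ "Totale" then pvTotaleScan rest + 1 else 0

def pvAfterTotale (xs : List String) : List String :=
  PySem.List.slice xs (some ((pvTotaleScan xs : Nat) : Int)) none

def normalize_label_tokens_alt (tokens : List String) : List String :=
  if tokens = [] then tokens
  else
    let lows := tokens.map PySem.Str.lower
    -- `next((i for i, (a, b) in enumerate(zip(lows, lows[1:])) if a != b), len(tokens) - 1)`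
    let keep := ((lows.zip lows.tail).findIdx? (fun p => p.1 != p.2)).getD (tokens.length - 1)
    let normalized := PySem.List.slice tokens (some (keep : Int)) none
    let after := pvAfterTotale normalized
    match after with
    | _ :: b :: rest => "Totale" :: b :: rest   -- len(after) > 1: ["Totale", *after[1:]]
    | _ => normalized

-- ===== PRECONDITION & SPEC =====
def Spec_normalize_label_tokens (tokens : List String) (out : List String) : Prop := out = normalize_label_tokens_alt tokens
instance (tokens : List String) (out : List String) : Decidable (Spec_normalize_label_tokens tokens out) := by unfold Spec_normalize_label_tokens; infer_instance

-- ===== CLAIM (what is proved, stated in full; the proofs are below) =====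
def Claim_equal_normalize_label_tokens : Prop := ∀ (tokens : List String), Dom_normalize_label_tokens tokens → Spec_normalize_label_tokens tokens (normalize_label_tokens tokens)

-- ===== LEMMAS AND PROOFS =====

-- A's pop-front loop lands exactly where B's zip/enumerate search cuts.
theorem pvPopLoop_eq_drop : ∀ xs : List String,
    pvPopLoop xs =
      xs.drop ((((xs.map PySem.Str.lower).zip (xs.map PySem.Str.lower).tail).findIdx?
                  (fun p => p.1 != p.2)).getD (xs.length - 1))
  | [] => rfl
  | [_] => rfl
  | a :: b :: rest => by
    have ih := pvPopLoop_eq_drop (b :: rest)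
    simp only [List.map_cons, List.tail_cons, List.zip_cons_cons, List.findIdx?_cons] at ih ⊢
    by_cases h : PySem.Str.lower a = PySem.Str.lower b
    · simp only [pvPopLoop, h, bne_self_eq_false]
      rw [ih]
      cases hf : ((List.map PySem.Str.lower rest).zip ((List.map PySem.Str.lower rest)).tail
            |>.findIdx? (fun p => p.1 != p.2)) with
      | none => simp [List.length]
      | some j => simp
    · have hb : (PySem.Str.lower a != PySem.Str.lower b) = true := by simp [h]
      simp [pvPopLoop, if_neg h, hb]

-- If "Totale" is absent, the scan runs to the end and the helper returns [].
theorem pvTotaleScan_of_not_mem : ∀ xs : List String, "Totale" ∉ xs → pvTotaleScan xs = xs.length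
  | [], _ => rfl
  | x :: rest, h => by
    have hx : x ≠ "Totale" := fun he => h (by simp [he])
    simp only [pvTotaleScan, if_pos hx, List.length_cons]
    rw [pvTotaleScan_of_not_mem rest (fun hm => h (List.mem_cons_of_mem _ hm))]

theorem pvAfterTotale_of_not_mem (xs : List String) (h : "Totale" ∉ xs) : pvAfterTotale xs = [] := by
  unfold pvAfterTotale
  rw [PySem.List.slice_from_natCast, pvTotaleScan_of_not_mem xs h, List.drop_length]

-- If "Totale" first occurs at idx, the scan stops at idx and the helper returns "Totale" plus the tail.
theorem pvTotaleScan_of_index : ∀ (xs : List String) (idx : Nat),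
    PySem.List.index? xs "Totale" = some idx → pvTotaleScan xs = idx
  | [], idx, h => by simp [PySem.List.index?] at h
  | x :: rest, idx, h => by
    by_cases hx : x = "Totale"
    · subst hx
      rw [PySem.List.index?_cons_self] at h
      cases h
      simp [pvTotaleScan]
    · rw [PySem.List.index?_cons_of_ne rest hx] at h
      cases hr : PySem.List.index? rest "Totale" with
      | none => rw [hr] at h; simp at h
      | some j =>
        rw [hr] at h
        simp only [Option.map_some] at h
        cases h
        simp only [pvTotaleScan, if_pos hx]
        rw [pvTotaleScan_of_index rest j hr]

theorem pvAfterTotale_of_index (xs : List String) (idx : Nat)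
    (h : PySem.List.index? xs "Totale" = some idx) :
    pvAfterTotale xs = "Totale" :: xs.drop (idx + 1) := by
  unfold pvAfterTotale
  rw [PySem.List.slice_from_natCast, pvTotaleScan_of_index xs idx h]
  obtain ⟨hk, hv, -⟩ := PySem.List.getElem_of_index?_eq_some h
  rw [List.drop_eq_getElem_cons hk, hv]

-- ===== VERDICT (by name: the statement is the Claim_ definition above) =====
theorem normalize_label_tokens_spec : Claim_equal_normalize_label_tokens := by
  intro tokens _
  unfold Spec_normalize_label_tokens normalize_label_tokens normalize_label_tokens_alt
  by_cases he : tokens = []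
  · simp [he]
  · simp only [if_neg he, PySem.List.slice_from_natCast, ← pvPopLoop_eq_drop]
    set normalized := pvPopLoop tokens with hn
    cases hidx : PySem.List.index? normalized "Totale" with
    | none =>
        have hmem : "Totale" ∉ normalized := by rw [PySem.List.index?_eq_none_iff] at hidx; exact hidx
        rw [pvAfterTotale_of_not_mem normalized hmem]
        simp [hmem]
    | some idx =>
        have hmem : "Totale" ∈ normalized :=
          (PySem.List.index?_isSome_iff (xs := normalized) (v := "Totale")).mp (by rw [hidx]; rfl)
        rw [pvAfterTotale_of_index normalized idx hidx]
        have hsl : PySem.List.slice normalized (some ((idx : Int) + 1)) none = normalized.drop (idx + 1) := by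
          have : ((idx : Int) + 1) = ((idx + 1 : Nat) : Int) := by push_cast; ring
          rw [this, PySem.List.slice_from_natCast]
        simp only [if_pos hmem, hsl]
        cases htail : normalized.drop (idx + 1) with
        | nil => simp
        | cons b r => simp
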